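-- pv_equiv track=rewrite | github.com/djova/advent-of-code | 2021/python/13_Transparent_Origami.py | iter_pairs_inward
-- ===== SOURCE A (Python) =====
-- def iter_pairs_inward(length):
--     max_i = length - 1
--     mid_i = int(length / 2)
--     if length % 2 == 0:
--         mid_i -= 1
--     for i in range(mid_i):
--         j = max_i - i
--         yield i, j
-- ===== SOURCE B (Python) =====
-- def iter_pairs_inward(length):
--     # Materialize the index list, pair it with its own reversal, and keep the
--     # pairs that are still strictly outside the middle (i < j - 1).
--     idx = list(range(length))
--     for i, j in zip(idx, reversed(idx)):
--         if i < j - 1: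
--             yield i, j
-- ===== Notes on version B (the rewrite author's own statement) =====
-- stated objective: alternative
-- what changed: Replaced A's midpoint arithmetic (truncating division, parity fix-up, half-length indexed range computing each partner index) by a zip-and-filter pipeline: pair the index list with its own reversal and keep exactly the pairs that lie strictly outside the middle; no division, parity test or midpoint appears.
import Mathlib
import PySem

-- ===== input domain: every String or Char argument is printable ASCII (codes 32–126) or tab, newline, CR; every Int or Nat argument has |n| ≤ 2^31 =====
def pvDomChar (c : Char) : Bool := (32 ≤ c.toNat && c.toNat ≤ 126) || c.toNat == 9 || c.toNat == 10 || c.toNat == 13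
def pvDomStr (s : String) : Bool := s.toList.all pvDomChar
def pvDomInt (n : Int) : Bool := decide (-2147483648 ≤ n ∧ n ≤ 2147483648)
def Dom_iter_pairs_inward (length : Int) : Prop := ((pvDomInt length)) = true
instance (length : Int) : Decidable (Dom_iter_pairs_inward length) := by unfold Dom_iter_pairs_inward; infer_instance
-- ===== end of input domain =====

-- B replaces A's midpoint arithmetic (truncating division + parity fix-up + indexed range)
-- by zipping the index list with its own reversal and filtering i < j - 1; objective: alternative.


-- ===== PORT A =====
-- int(length / 2): true division then truncation toward zero; exact as Int.tdiv for |length| ≤ 2^31 (inside Dom, floats are exact there)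
def iter_pairs_inward (length : Int) : List (Int × Int) :=
  let max_i := length - 1
  let mid_i0 := Int.tdiv length 2
  let mid_i := if PySem.Int.mod length 2 = 0 then mid_i0 - 1 else mid_i0
  (PySem.List.pyRange 0 mid_i 1).map (fun i => (i, max_i - i))

-- ===== PORT B =====
def iter_pairs_inward_alt (length : Int) : List (Int × Int) :=
  let idx := PySem.List.pyRange 0 length 1
  (idx.zip idx.reverse).filter (fun p => p.1 < p.2 - 1)

-- ===== PRECONDITION & SPEC =====
def Spec_iter_pairs_inward (length : Int) (out : List (Int × Int)) : Prop := out = iter_pairs_inward_alt length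
instance (length : Int) (out : List (Int × Int)) : Decidable (Spec_iter_pairs_inward length out) := by unfold Spec_iter_pairs_inward; infer_instance

-- ===== CLAIM (what is proved, stated in full; the proofs are below) =====
def Claim_equal_iter_pairs_inward : Prop := ∀ (length : Int), Dom_iter_pairs_inward length → Spec_iter_pairs_inward length (iter_pairs_inward length)

-- ===== LEMMAS AND PROOFS =====

-- zipping the cast index list with its own reversal pairs each k with n-1-k
theorem pvZip_eq (n : Nat) :
    ((List.range n).map (fun (k : Nat) => (k : Int))).zip
        (((List.range n).map (fun (k : Nat) => (k : Int))).reverse)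
      = (List.range n).map (fun (k : Nat) => ((k : Int), (n : Int) - 1 - (k : Int))) := by
  apply List.ext_getElem
  · simp
  · intro i h1 h2
    have hi : i < n := by simpa using h2
    simp [List.getElem_zip, List.getElem_reverse, Prod.ext_iff]
    omega

-- filtering range n by (· < m) truncates it to range m (for m ≤ n)
theorem pvFilterRange (n : Nat) : ∀ (m : Nat), m ≤ n →
    (List.range n).filter (fun k => decide (k < m)) = List.range m := by
  induction n with
  | zero => intro m h; simp [Nat.le_zero.mp h]
  | succ n ih =>
    intro m h
    by_cases hm : m ≤ n
    · rw [List.range_succ, List.filter_append, ih m hm]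
      simp [Nat.not_lt.mpr hm]
    · have hme : m = n + 1 := by omega
      subst hme
      apply List.filter_eq_self.mpr
      intro a ha
      simp only [List.mem_range] at ha
      simpa using ha

-- ===== VERDICT (by name: the statement is the Claim_ definition above) =====
theorem iter_pairs_inward_spec : Claim_equal_iter_pairs_inward := by
  intro length _
  unfold Spec_iter_pairs_inward
  simp only [iter_pairs_inward, iter_pairs_inward_alt, PySem.List.pyRange_one, zero_add, Int.sub_zero]
  rw [pvZip_eq, List.filter_map]
  have hcong : (List.range length.toNat).filter
        ((fun (p : Int × Int) => decide (p.1 < p.2 - 1)) ∘ (fun (k : Nat) => ((k : Int), (length.toNat : Int) - 1 - (k : Int))))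
      = (List.range length.toNat).filter (fun k => decide (k < (length.toNat - 1) / 2)) := by
    apply List.filter_congr
    intro k hk
    simp only [Function.comp, decide_eq_decide]
    omega
  rw [hcong, pvFilterRange length.toNat ((length.toNat - 1) / 2) (by omega)]
  have hmid : ((if PySem.Int.mod length 2 = 0 then Int.tdiv length 2 - 1 else Int.tdiv length 2)).toNat
      = (length.toNat - 1) / 2 := by
    have hm : PySem.Int.mod length 2 = length % 2 :=
      PySem.Int.mod_eq_emod_of_pos (by norm_num)
    have ht := Int.mul_tdiv_add_tmod length 2
    rw [hm]
    rcases le_or_gt 0 length with hl | hl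
    · have hb1 : 0 ≤ length.tmod 2 := Int.tmod_nonneg _ hl
      have hb2 : length.tmod 2 < 2 := Int.tmod_lt_of_pos length (by norm_num)
      split_ifs with hp <;> omega
    · have h1 := Int.tmod_lt_of_pos (-length) (b := 2) (by norm_num)
      have h2 := Int.tmod_nonneg (a := -length) 2 (by omega)
      simp only [Int.neg_tmod] at h1 h2
      split_ifs with hp <;> omega
  rw [hmid, List.map_map]
  rcases le_or_gt length 1 with hl | hl
  · have h0 : (length.toNat - 1) / 2 = 0 := by omega
    rw [h0]
    simp
  · have hcast : ((length.toNat : Int)) = length := Int.toNat_of_nonneg (by omega)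
    apply List.map_congr_left
    intro k _
    simp only [Function.comp, hcast]
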